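-- pv_equiv track=rewrite | github.com/MegaTom00/FrancesLab | app.py | create_recommendations
-- ===== SOURCE A (Python) =====
-- def create_recommendations(ingredients, replacements):
--     recommendations = []
--     # Deberíamos generar 10 recomendaciones (para cada uno de los posibles reemplazos)
--     for idx in range(10):
--         recommendation = ingredients.copy()
--         for i, ingredient in enumerate(recommendation):
--             if ingredient in replacements:
--                 # Reemplazamos con el idx-ésimo reemplazo para cada ingrediente artificial
--                 recommendation[i] = replacements[ingredient][idx]
--         recommendations.append(recommendation)
--     return recommendations
-- ===== SOURCE B (Python) =====
-- def create_recommendations(ingredients, replacements):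
--     # Precompute one 10-entry column per ingredient, then transpose.
--     columns = []
--     for ingredient in ingredients:
--         if ingredient in replacements:
--             columns.append([replacements[ingredient][j] for j in range(10)])
--         else:
--             columns.append([ingredient] * 10)
--     return [[col[idx] for col in columns] for idx in range(10)]
-- ===== Notes on version B (the rewrite author's own statement) =====
-- stated objective: faster
-- what changed: B does the dict lookup once per ingredient, building a 10-entry column per ingredient in a single pass, and then transposes the columns, instead of A's re-copying the ingredient list and re-looking up every ingredient for each of the 10 rounds.
import Mathlib
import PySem

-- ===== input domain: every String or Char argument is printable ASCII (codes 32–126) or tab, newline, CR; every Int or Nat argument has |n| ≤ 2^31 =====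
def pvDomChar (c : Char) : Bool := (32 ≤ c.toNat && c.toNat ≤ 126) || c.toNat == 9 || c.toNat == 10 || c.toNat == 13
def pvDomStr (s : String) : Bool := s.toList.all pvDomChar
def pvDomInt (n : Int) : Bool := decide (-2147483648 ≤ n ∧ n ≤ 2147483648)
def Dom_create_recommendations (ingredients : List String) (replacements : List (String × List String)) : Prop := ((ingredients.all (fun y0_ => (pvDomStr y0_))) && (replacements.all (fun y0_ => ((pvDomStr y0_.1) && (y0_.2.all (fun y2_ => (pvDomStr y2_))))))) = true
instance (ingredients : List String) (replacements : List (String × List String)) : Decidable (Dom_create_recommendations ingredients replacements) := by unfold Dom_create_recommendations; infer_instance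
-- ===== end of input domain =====

-- B replaces A's 10 rounds of copy-and-relookup with one column per ingredient plus a transpose (one dict lookup per ingredient); return values only, neither mutates its arguments.

-- ===== PORT A =====
-- inner loop 'for i, ingredient in enumerate(recommendation): if ingredient in replacements: recommendation[i] = replacements[ingredient][idx]';
-- the enumerate index is always ≥ 0, so '.toNat' is exact; pyGet? = none (IndexError) is excluded by Pre_ (getD "" is never read under Pre_).
def caInner (d : PySem.Dict String (List String)) (idx : Int) : List (Int × String) → List String → List String
  | [], rec => rec
  | (i, ing) :: rest, rec =>
      caInner d idx rest
        (match d.get? ing with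
         | some lst => rec.set i.toNat ((PySem.List.pyGet? lst idx).getD "")
         | none => rec)

def create_recommendations (ingredients : List String) (replacements : List (String × List String)) : List (List String) :=
  let d := PySem.Dict.ofList replacements
  (PySem.List.pyRange 0 10 1).foldl
    (fun recs idx => recs ++ [caInner d idx (PySem.List.enumerate ingredients 0) ingredients]) []

-- ===== PORT B =====
def create_recommendations_alt (ingredients : List String) (replacements : List (String × List String)) : List (List String) :=
  let d := PySem.Dict.ofList replacements
  let columns := ingredients.map (fun ing =>
    match d.get? ing with
    | some lst => (PySem.List.pyRange 0 10 1).map (fun j => (PySem.List.pyGet? lst j).getD "")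
    | none => List.replicate 10 ing)
  (PySem.List.pyRange 0 10 1).map (fun idx =>
    columns.map (fun col => (PySem.List.pyGet? col idx).getD ""))

-- ===== PRECONDITION & SPEC =====
-- Pre_: every ingredient that is a key of the replacements dict maps to a list of at least 10
-- entries; otherwise Python's replacements[ingredient][idx] raises IndexError for some idx < 10.
def Pre_create_recommendations (ingredients : List String) (replacements : List (String × List String)) : Prop :=
  (ingredients.all (fun ing =>
    ((PySem.Dict.ofList replacements).get? ing).all (fun lst => decide (10 ≤ lst.length)))) = true
instance (ingredients : List String) (replacements : List (String × List String)) : Decidable (Pre_create_recommendations ingredients replacements) := by unfold Pre_create_recommendations; infer_instance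

def pvWitness_create_recommendations : List String × (List (String × List String)) :=
  (["a", "b"], [("b", ["0","1","2","3","4","5","6","7","8","9"])])

def Spec_create_recommendations (ingredients : List String) (replacements : List (String × List String)) (out : List (List String)) : Prop := out = create_recommendations_alt ingredients replacements
instance (ingredients : List String) (replacements : List (String × List String)) (out : List (List String)) : Decidable (Spec_create_recommendations ingredients replacements out) := by unfold Spec_create_recommendations; infer_instance

-- ===== CLAIM (what is proved, stated in full; the proofs are below) =====
def Claim_equal_create_recommendations : Prop := ∀ (ingredients : List String) (replacements : List (String × List String)), Dom_create_recommendations ingredients replacements → Pre_create_recommendations ingredients replacements → Spec_create_recommendations ingredients replacements (create_recommendations ingredients replacements)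

-- ===== LEMMAS AND PROOFS =====

-- the common per-element substitution function both programs compute (under Pre_)
def caSub (d : PySem.Dict String (List String)) (idx : Int) (ing : String) : String :=
  match d.get? ing with
  | some lst => (PySem.List.pyGet? lst idx).getD ""
  | none => ing

theorem caInner_eq_map (d : PySem.Dict String (List String)) (idx : Int) :
    ∀ (l pre : List String),
      caInner d idx (PySem.List.enumerate l (pre.length : Int)) (pre ++ l) = pre ++ l.map (caSub d idx) := by
  intro l
  induction l with
  | nil => intro pre; simp [caInner, PySem.List.enumerate_nil]
  | cons x xs ih =>
    intro pre
    rw [PySem.List.enumerate_cons]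
    cases h : d.get? x with
    | none =>
      simp only [caInner, h]
      have hthis := ih (pre ++ [x])
      have hlen : (((pre ++ [x]).length : Nat) : Int) = (pre.length : Int) + 1 := by simp
      rw [hlen, List.append_assoc, List.singleton_append] at hthis
      rw [hthis, List.map_cons]
      simp [caSub, h]
    | some lst =>
      simp only [caInner, h]
      have hset : (pre ++ x :: xs).set ((pre.length : Int)).toNat ((PySem.List.pyGet? lst idx).getD "")
          = pre ++ ((PySem.List.pyGet? lst idx).getD "") :: xs := by simp
      rw [hset]
      have hthis := ih (pre ++ [(PySem.List.pyGet? lst idx).getD ""])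
      have hlen : (((pre ++ [(PySem.List.pyGet? lst idx).getD ""]).length : Nat) : Int) = (pre.length : Int) + 1 := by simp
      rw [hlen, List.append_assoc, List.singleton_append] at hthis
      rw [hthis, List.map_cons]
      simp [caSub, h]

theorem colGet_eq_caSub (d : PySem.Dict String (List String)) (idx : Int)
    (h0 : 0 ≤ idx) (h10 : idx < 10) (ing : String)
    (hpre : ((d.get? ing).all (fun lst => decide (10 ≤ lst.length))) = true) :
    (PySem.List.pyGet? (match d.get? ing with
        | some lst => (PySem.List.pyRange 0 10 1).map (fun j => (PySem.List.pyGet? lst j).getD "")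
        | none => List.replicate 10 ing) idx).getD "" = caSub d idx ing := by
  cases h : d.get? ing with
  | none =>
    simp only [caSub, h]
    interval_cases idx <;> rfl
  | some lst =>
    simp only [caSub, h]
    interval_cases idx <;> rfl

-- ===== VERDICT (by name: the statement is the Claim_ definition above) =====
theorem create_recommendations_spec : Claim_equal_create_recommendations := by
  intro ingredients replacements _hdom hpre
  unfold Spec_create_recommendations create_recommendations create_recommendations_alt
  set d := PySem.Dict.ofList replacements with hd
  rw [PySem.List.foldl_append_singleton_eq_map]
  apply List.map_congr_left
  intro idx hidx
  rw [PySem.List.mem_pyRange_one] at hidx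
  have hrow := caInner_eq_map d idx ingredients []
  simp only [List.length_nil, Int.natCast_zero, List.nil_append] at hrow
  rw [hrow, List.map_map]
  apply List.map_congr_left
  intro ing hing
  unfold Pre_create_recommendations at hpre
  rw [List.all_eq_true] at hpre
  exact (colGet_eq_caSub d idx hidx.1 hidx.2 ing (hpre ing hing)).symm
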